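-- pv_equiv track=rewrite | github.com/C-Kapsalis/timed-by-design | hd_bodygraph.py | get_defined_channels
-- ===== SOURCE A (Python) =====
-- CHANNELS = {
--     '1-8': {'gates': [1, 8], 'centers': ['G', 'Throat'], 'name': 'Inspiration'},
--     '2-14': {'gates': [2, 14], 'centers': ['G', 'Sacral'], 'name': 'The Beat'},
--     '3-60': {'gates': [3, 60], 'centers': ['Sacral', 'Root'], 'name': 'Mutation'},
--     '4-63': {'gates': [4, 63], 'centers': ['Ajna', 'Head'], 'name': 'Logic'},
--     '5-15': {'gates': [5, 15], 'centers': ['Sacral', 'G'], 'name': 'Rhythm'},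
--     '6-59': {'gates': [6, 59], 'centers': ['Solar Plexus', 'Sacral'], 'name': 'Intimacy'},
--     '7-31': {'gates': [7, 31], 'centers': ['G', 'Throat'], 'name': 'Alpha'},
--     '9-52': {'gates': [9, 52], 'centers': ['Sacral', 'Root'], 'name': 'Concentration'},
--     '10-20': {'gates': [10, 20], 'centers': ['G', 'Throat'], 'name': 'Awakening'},
--     '10-34': {'gates': [10, 34], 'centers': ['G', 'Sacral'], 'name': 'Exploration'},
--     '10-57': {'gates': [10, 57], 'centers': ['G', 'Spleen'], 'name': 'Perfected Form'},
--     '11-56': {'gates': [11, 56], 'centers': ['Ajna', 'Throat'], 'name': 'Curiosity'},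
--     '12-22': {'gates': [12, 22], 'centers': ['Throat', 'Solar Plexus'], 'name': 'Openness'},
--     '13-33': {'gates': [13, 33], 'centers': ['G', 'Throat'], 'name': 'Prodigal'},
--     '16-48': {'gates': [16, 48], 'centers': ['Throat', 'Spleen'], 'name': 'Wavelength'},
--     '17-62': {'gates': [17, 62], 'centers': ['Ajna', 'Throat'], 'name': 'Acceptance'},
--     '18-58': {'gates': [18, 58], 'centers': ['Spleen', 'Root'], 'name': 'Judgment'},
--     '19-49': {'gates': [19, 49], 'centers': ['Root', 'Solar Plexus'], 'name': 'Synthesis'},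
--     '20-34': {'gates': [20, 34], 'centers': ['Throat', 'Sacral'], 'name': 'Charisma'},
--     '20-57': {'gates': [20, 57], 'centers': ['Throat', 'Spleen'], 'name': 'Brain Wave'},
--     '21-45': {'gates': [21, 45], 'centers': ['Heart', 'Throat'], 'name': 'Money'},
--     '23-43': {'gates': [23, 43], 'centers': ['Throat', 'Ajna'], 'name': 'Structuring'},
--     '24-61': {'gates': [24, 61], 'centers': ['Ajna', 'Head'], 'name': 'Awareness'},
--     '25-51': {'gates': [25, 51], 'centers': ['G', 'Heart'], 'name': 'Initiation'},
--     '26-44': {'gates': [26, 44], 'centers': ['Heart', 'Spleen'], 'name': 'Surrender'},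
--     '27-50': {'gates': [27, 50], 'centers': ['Sacral', 'Spleen'], 'name': 'Preservation'},
--     '28-38': {'gates': [28, 38], 'centers': ['Spleen', 'Root'], 'name': 'Struggle'},
--     '29-46': {'gates': [29, 46], 'centers': ['Sacral', 'G'], 'name': 'Discovery'},
--     '30-41': {'gates': [30, 41], 'centers': ['Solar Plexus', 'Root'], 'name': 'Recognition'},
--     '32-54': {'gates': [32, 54], 'centers': ['Spleen', 'Root'], 'name': 'Transformation'},
--     '34-57': {'gates': [34, 57], 'centers': ['Sacral', 'Spleen'], 'name': 'Power'},
--     '35-36': {'gates': [35, 36], 'centers': ['Throat', 'Solar Plexus'], 'name': 'Transitoriness'},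
--     '37-40': {'gates': [37, 40], 'centers': ['Solar Plexus', 'Heart'], 'name': 'Community'},
--     '39-55': {'gates': [39, 55], 'centers': ['Root', 'Solar Plexus'], 'name': 'Emoting'},
--     '42-53': {'gates': [42, 53], 'centers': ['Sacral', 'Root'], 'name': 'Maturation'},
--     '47-64': {'gates': [47, 64], 'centers': ['Ajna', 'Head'], 'name': 'Abstraction'},
-- }
--
-- def get_defined_channels(active_gates):
--     defined_channels = []
--     gate_numbers = set(active_gates)
--
--     for channel_key, channel_data in CHANNELS.items():
--         gate1, gate2 = channel_data['gates']
--         if gate1 in gate_numbers and gate2 in gate_numbers: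
--             defined_channels.append(channel_key)
--
--     return defined_channels
-- ===== SOURCE B (Python) =====
-- # Event-driven re-implementation: instead of scanning the channel table and testing
-- # both gates of each channel, walk the deduplicated active gates once through an
-- # inverted gate -> (partner, pair) index, marking a channel pair as soon as its
-- # partner gate has already been seen; channel keys are synthesised from the gate
-- # pairs rather than read from a channel table.
--
-- PAIRS = [
--     (1, 8), (2, 14), (3, 60), (4, 63), (5, 15), (6, 59), (7, 31), (9, 52),
--     (10, 20), (10, 34), (10, 57), (11, 56), (12, 22), (13, 33), (16, 48),
--     (17, 62), (18, 58), (19, 49), (20, 34), (20, 57), (21, 45), (23, 43),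
--     (24, 61), (25, 51), (26, 44), (27, 50), (28, 38), (29, 46), (30, 41),
--     (32, 54), (34, 57), (35, 36), (37, 40), (39, 55), (42, 53), (47, 64),
-- ]
--
-- # Flat entry list, then the inverted index, built once at import time.
-- ENTRIES = []
-- for _x, _y in PAIRS:
--     ENTRIES.append((_x, (_y, (_x, _y))))
--     ENTRIES.append((_y, (_x, (_x, _y))))
--
-- INDEX = {}
-- for _gate, _entry in ENTRIES:
--     INDEX.setdefault(_gate, []).append(_entry)
--
--
-- def get_defined_channels(active_gates):
--     seen = set()
--     defined = set()
--     for g in dict.fromkeys(active_gates):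
--         for other, pair in INDEX.get(g, []):
--             if other in seen:
--                 defined.add(pair)
--         seen.add(g)
--     return [f"{x}-{y}" for (x, y) in PAIRS if (x, y) in defined]
-- ===== Notes on version B (the rewrite author's own statement) =====
-- stated objective: alternative
-- what changed: Replaces the per-channel scan testing both gates against the active set with an event-driven pass over the deduplicated active gates through a precomputed inverted index (gate -> (partner gate, channel pair)), marking a pair defined when its partner gate was already seen, then emitting the marked pairs in table order with the channel key synthesised from the gate numbers instead of read from the channel table.
import Mathlib
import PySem

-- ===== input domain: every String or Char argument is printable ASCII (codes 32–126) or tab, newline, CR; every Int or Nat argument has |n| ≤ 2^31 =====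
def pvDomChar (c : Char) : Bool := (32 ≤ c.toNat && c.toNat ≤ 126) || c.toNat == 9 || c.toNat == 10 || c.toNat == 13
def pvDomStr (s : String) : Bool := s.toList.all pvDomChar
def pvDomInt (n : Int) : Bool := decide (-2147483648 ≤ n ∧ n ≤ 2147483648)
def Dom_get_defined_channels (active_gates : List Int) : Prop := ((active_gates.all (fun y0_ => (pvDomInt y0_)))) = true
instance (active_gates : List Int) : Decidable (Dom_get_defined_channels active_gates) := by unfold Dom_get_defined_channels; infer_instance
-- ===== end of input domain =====

-- B replaces the per-channel both-gates-active scan by an event-driven pass over the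
-- deduplicated active gates through an inverted gate->(partner, pair) index, with the
-- channel keys synthesised from the gate pairs (alternative decomposition).

-- ===== PORT A =====
structure ChannelData where
  gates : List Int
  centers : List String
  name : String
deriving DecidableEq, Repr

def CHANNELS : List (String × ChannelData) := [
  ("1-8", ⟨[1, 8], ["G", "Throat"], "Inspiration"⟩),
  ("2-14", ⟨[2, 14], ["G", "Sacral"], "The Beat"⟩),
  ("3-60", ⟨[3, 60], ["Sacral", "Root"], "Mutation"⟩),
  ("4-63", ⟨[4, 63], ["Ajna", "Head"], "Logic"⟩),
  ("5-15", ⟨[5, 15], ["Sacral", "G"], "Rhythm"⟩),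
  ("6-59", ⟨[6, 59], ["Solar Plexus", "Sacral"], "Intimacy"⟩),
  ("7-31", ⟨[7, 31], ["G", "Throat"], "Alpha"⟩),
  ("9-52", ⟨[9, 52], ["Sacral", "Root"], "Concentration"⟩),
  ("10-20", ⟨[10, 20], ["G", "Throat"], "Awakening"⟩),
  ("10-34", ⟨[10, 34], ["G", "Sacral"], "Exploration"⟩),
  ("10-57", ⟨[10, 57], ["G", "Spleen"], "Perfected Form"⟩),
  ("11-56", ⟨[11, 56], ["Ajna", "Throat"], "Curiosity"⟩),
  ("12-22", ⟨[12, 22], ["Throat", "Solar Plexus"], "Openness"⟩),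
  ("13-33", ⟨[13, 33], ["G", "Throat"], "Prodigal"⟩),
  ("16-48", ⟨[16, 48], ["Throat", "Spleen"], "Wavelength"⟩),
  ("17-62", ⟨[17, 62], ["Ajna", "Throat"], "Acceptance"⟩),
  ("18-58", ⟨[18, 58], ["Spleen", "Root"], "Judgment"⟩),
  ("19-49", ⟨[19, 49], ["Root", "Solar Plexus"], "Synthesis"⟩),
  ("20-34", ⟨[20, 34], ["Throat", "Sacral"], "Charisma"⟩),
  ("20-57", ⟨[20, 57], ["Throat", "Spleen"], "Brain Wave"⟩),
  ("21-45", ⟨[21, 45], ["Heart", "Throat"], "Money"⟩),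
  ("23-43", ⟨[23, 43], ["Throat", "Ajna"], "Structuring"⟩),
  ("24-61", ⟨[24, 61], ["Ajna", "Head"], "Awareness"⟩),
  ("25-51", ⟨[25, 51], ["G", "Heart"], "Initiation"⟩),
  ("26-44", ⟨[26, 44], ["Heart", "Spleen"], "Surrender"⟩),
  ("27-50", ⟨[27, 50], ["Sacral", "Spleen"], "Preservation"⟩),
  ("28-38", ⟨[28, 38], ["Spleen", "Root"], "Struggle"⟩),
  ("29-46", ⟨[29, 46], ["Sacral", "G"], "Discovery"⟩),
  ("30-41", ⟨[30, 41], ["Solar Plexus", "Root"], "Recognition"⟩),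
  ("32-54", ⟨[32, 54], ["Spleen", "Root"], "Transformation"⟩),
  ("34-57", ⟨[34, 57], ["Sacral", "Spleen"], "Power"⟩),
  ("35-36", ⟨[35, 36], ["Throat", "Solar Plexus"], "Transitoriness"⟩),
  ("37-40", ⟨[37, 40], ["Solar Plexus", "Heart"], "Community"⟩),
  ("39-55", ⟨[39, 55], ["Root", "Solar Plexus"], "Emoting"⟩),
  ("42-53", ⟨[42, 53], ["Sacral", "Root"], "Maturation"⟩),
  ("47-64", ⟨[47, 64], ["Ajna", "Head"], "Abstraction"⟩)
]

def get_defined_channels (active_gates : List Int) : List String :=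
  -- defined_channels = []; gate_numbers = set(active_gates)
  let gate_numbers : PySem.Set Int := PySem.Set.ofList active_gates
  CHANNELS.foldl (fun defined_channels kv =>
    match kv.2.gates with
    | [gate1, gate2] =>  -- gate1, gate2 = channel_data['gates']
        if PySem.Set.contains gate_numbers gate1 && PySem.Set.contains gate_numbers gate2 then
          defined_channels ++ [kv.1]
        else defined_channels
    | _ => defined_channels)  -- unreachable: every 'gates' list in CHANNELS has exactly two elements
    []

-- ===== PORT B =====

def PAIRS : List (Int × Int) := [
  (1, 8), (2, 14), (3, 60), (4, 63), (5, 15), (6, 59), (7, 31), (9, 52),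
  (10, 20), (10, 34), (10, 57), (11, 56), (12, 22), (13, 33), (16, 48),
  (17, 62), (18, 58), (19, 49), (20, 34), (20, 57), (21, 45), (23, 43),
  (24, 61), (25, 51), (26, 44), (27, 50), (28, 38), (29, 46), (30, 41),
  (32, 54), (34, 57), (35, 36), (37, 40), (39, 55), (42, 53), (47, 64)]

-- ENTRIES: for each pair (x, y), (x, (y, (x, y))) and (y, (x, (x, y)))
def ENTRIES : List (Int × Int × Int × Int) :=
  PAIRS.foldl (fun acc q => acc ++ [(q.1, (q.2, q)), (q.2, (q.1, q))]) []

-- INDEX = {}; for gate, entry in ENTRIES: INDEX.setdefault(gate, []).append(entry)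
def INDEX : PySem.Dict Int (List (Int × Int × Int)) :=
  ENTRIES.foldl (fun d p => PySem.Dict.modify d p.1 [] (· ++ [p.2])) PySem.Dict.empty

def get_defined_channels_alt (active_gates : List Int) : List String :=
  let st := (PySem.List.dedup active_gates).foldl
    (fun st g =>
      let defined := (PySem.Dict.getD INDEX g []).foldl
        (fun df p => if PySem.Set.contains st.1 p.1 then PySem.Set.add df p.2 else df) st.2
      (PySem.Set.add st.1 g, defined))
    ((PySem.Set.empty : PySem.Set Int), (PySem.Set.empty : PySem.Set (Int × Int)))
  (PAIRS.filter (fun q => PySem.Set.contains st.2 q)).map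
    (fun q => PySem.Int.toStr q.1 ++ "-" ++ PySem.Int.toStr q.2)

-- ===== PRECONDITION & SPEC =====
def Spec_get_defined_channels (active_gates : List Int) (out : List String) : Prop := out = get_defined_channels_alt active_gates
instance (active_gates : List Int) (out : List String) : Decidable (Spec_get_defined_channels active_gates out) := by unfold Spec_get_defined_channels; infer_instance

-- ===== CLAIM (what is proved, stated in full; the proofs are below) =====
def Claim_equal_get_defined_channels : Prop := ∀ (active_gates : List Int), Dom_get_defined_channels active_gates → Spec_get_defined_channels active_gates (get_defined_channels active_gates)

-- ===== LEMMAS AND PROOFS =====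

-- facts about the literal data, checked by decide
lemma entries_symm : ∀ p ∈ ENTRIES, (p.2.1, (p.1, p.2.2)) ∈ ENTRIES := by decide
lemma entries_ne : ∀ p ∈ ENTRIES, p.1 ≠ p.2.1 := by decide
lemma pairs_entry : ∀ q ∈ PAIRS, (q.1, (q.2, q)) ∈ ENTRIES := by decide
lemma pairs_uniq : ∀ q ∈ PAIRS, ∀ p ∈ ENTRIES, p.2.2 = q →
    (p.1 = q.1 ∧ p.2.1 = q.2) ∨ (p.1 = q.2 ∧ p.2.1 = q.1) := by decide

-- CHANNELS and PAIRS run in lockstep: same gates, and the key is the formatted pair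
lemma channels_pairs : List.Forall₂
    (fun (kv : String × ChannelData) (q : Int × Int) =>
      kv.2.gates = [q.1, q.2] ∧ kv.1 = PySem.Int.toStr q.1 ++ "-" ++ PySem.Int.toStr q.2)
    CHANNELS PAIRS := by decide

lemma index_getD (g : Int) :
    PySem.Dict.getD INDEX g [] = (ENTRIES.filter (fun p => p.1 == g)).map (·.2) := by
  have h := PySem.Dict.getD_foldl_modify_append (l := ENTRIES) (d := PySem.Dict.empty) (c := g)
  simpa [INDEX, PySem.Dict.getD_empty] using h

lemma mem_index (g : Int) (o : Int) (q : Int × Int) :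
    (o, q) ∈ PySem.Dict.getD INDEX g [] ↔ (g, (o, q)) ∈ ENTRIES := by
  rw [index_getD]
  simp only [List.mem_map, List.mem_filter, beq_iff_eq]
  constructor
  · rintro ⟨p, ⟨hp, rfl⟩, h2⟩
    rwa [← h2]
  · intro h
    exact ⟨(g, (o, q)), ⟨h, rfl⟩, rfl⟩

lemma inner_mem (q : Int × Int) (L : List (Int × Int × Int)) (seen : PySem.Set Int) :
    ∀ df : PySem.Set (Int × Int),
    (q ∈ L.foldl (fun df p => if PySem.Set.contains seen p.1 then PySem.Set.add df p.2 else df) df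
      ↔ q ∈ df ∨ ∃ o, (o, q) ∈ L ∧ o ∈ seen) := by
  induction L with
  | nil => simp
  | cons p L ih =>
    intro df
    simp only [List.foldl_cons]
    by_cases hc : p.1 ∈ seen
    · rw [ih, if_pos (by simpa [PySem.Set.contains_iff] using hc), PySem.Set.mem_add]
      constructor
      · rintro (h | h)
        · rcases h with h | rfl
          · exact Or.inl h
          · exact Or.inr ⟨p.1, by simp [hc]⟩
        · rcases h with ⟨o, ho, hs⟩
          exact Or.inr ⟨o, by simp [ho], hs⟩
      · rintro (h | ⟨o, ho, hs⟩)
        · exact Or.inl (Or.inl h)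
        · rcases List.mem_cons.mp ho with h | h
          · exact Or.inl (Or.inr (congrArg Prod.snd h))
          · exact Or.inr ⟨o, h, hs⟩
    · rw [if_neg (by simpa [PySem.Set.contains_iff] using hc), ih]
      constructor
      · rintro (h | ⟨o, ho, hs⟩)
        · exact Or.inl h
        · exact Or.inr ⟨o, List.mem_cons_of_mem _ ho, hs⟩
      · rintro (h | ⟨o, ho, hs⟩)
        · exact Or.inl h
        · rcases List.mem_cons.mp ho with h | h
          · exact absurd (by rw [show o = p.1 from congrArg Prod.fst h] at hs; exact hs) hc
          · exact Or.inr ⟨o, h, hs⟩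

-- the tally step of port B
def tallyStep (st : PySem.Set Int × PySem.Set (Int × Int)) (g : Int) :
    PySem.Set Int × PySem.Set (Int × Int) :=
  let defined := (PySem.Dict.getD INDEX g []).foldl
    (fun df p => if PySem.Set.contains st.1 p.1 then PySem.Set.add df p.2 else df) st.2
  (PySem.Set.add st.1 g, defined)

-- invariant of the event-driven pass: q is marked iff some entry has one gate in
-- the processed list and its partner already seen (or in the processed list)
lemma tally_mem (q : Int × Int) :
    ∀ (gs : List Int) (seen : PySem.Set Int) (df : PySem.Set (Int × Int)),
    (q ∈ (gs.foldl tallyStep (seen, df)).2 ↔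
      q ∈ df ∨ ∃ a b, (a, (b, q)) ∈ ENTRIES ∧ a ∈ gs ∧ (b ∈ seen ∨ b ∈ gs)) := by
  intro gs
  induction gs with
  | nil => simp
  | cons g rest ih =>
    intro seen df
    simp only [List.foldl_cons]
    rw [show tallyStep (seen, df) g =
        (PySem.Set.add seen g, (PySem.Dict.getD INDEX g []).foldl
          (fun df p => if PySem.Set.contains seen p.1 then PySem.Set.add df p.2 else df) df) from rfl]
    rw [ih]
    constructor
    · rintro (h | ⟨a, b, hE, ha, hb⟩)
      · rw [inner_mem] at h
        rcases h with h | ⟨o, ho, hs⟩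
        · exact Or.inl h
        · rw [mem_index] at ho
          exact Or.inr ⟨g, o, ho, List.mem_cons_self .., Or.inl hs⟩
      · refine Or.inr ⟨a, b, hE, List.mem_cons_of_mem _ ha, ?_⟩
        rcases hb with hb | hb
        · rcases (PySem.Set.mem_add ..).mp hb with hb | rfl
          · exact Or.inl hb
          · exact Or.inr (List.mem_cons_self ..)
        · exact Or.inr (List.mem_cons_of_mem _ hb)
    · rintro (h | ⟨a, b, hE, ha, hb⟩)
      · exact Or.inl ((inner_mem ..).mpr (Or.inl h))
      · have hne : a ≠ b := entries_ne _ hE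
        rcases List.mem_cons.mp ha with rfl | ha
        · -- a = g
          rcases hb with hb | hb
          · exact Or.inl ((inner_mem ..).mpr (Or.inr ⟨b, (mem_index ..).mpr hE, hb⟩))
          · rcases List.mem_cons.mp hb with rfl | hb
            · exact absurd rfl hne
            · -- b in rest, a = g already seen: use the symmetric entry
              refine Or.inr ⟨b, a, entries_symm _ hE, hb,
                Or.inl ((PySem.Set.mem_add ..).mpr (Or.inr rfl))⟩
        · refine Or.inr ⟨a, b, hE, ha, ?_⟩
          rcases hb with hb | hb
          · exact Or.inl ((PySem.Set.mem_add ..).mpr (Or.inl hb))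
          · rcases List.mem_cons.mp hb with rfl | hb
            · exact Or.inl ((PySem.Set.mem_add ..).mpr (Or.inr rfl))
            · exact Or.inr hb

-- per-pair characterisation of the marked set
lemma defined_iff (q : Int × Int) (hq : q ∈ PAIRS) (ag : List Int) :
    (q ∈ ((PySem.List.dedup ag).foldl tallyStep
        ((PySem.Set.empty : PySem.Set Int), (PySem.Set.empty : PySem.Set (Int × Int)))).2 ↔
      q.1 ∈ ag ∧ q.2 ∈ ag) := by
  rw [tally_mem]
  simp only [PySem.Set.empty]
  constructor
  · rintro (h | ⟨a, b, hE, ha, hb⟩)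
    · simp at h
    · rcases hb with hb | hb
      · simp at hb
      · rcases pairs_uniq q hq _ hE rfl with ⟨h1, h2⟩ | ⟨h1, h2⟩
        · exact ⟨(PySem.List.mem_dedup ..).mp (h1 ▸ ha), (PySem.List.mem_dedup ..).mp (h2 ▸ hb)⟩
        · exact ⟨(PySem.List.mem_dedup ..).mp (h2 ▸ hb), (PySem.List.mem_dedup ..).mp (h1 ▸ ha)⟩
  · rintro ⟨h1, h2⟩
    exact Or.inr ⟨q.1, q.2, pairs_entry q hq,
      (PySem.List.mem_dedup ..).mpr h1, Or.inr ((PySem.List.mem_dedup ..).mpr h2)⟩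

-- the final scans of A and B agree channel by channel, walking CHANNELS and PAIRS in lockstep
lemma final_eq (ag : List Int) :
    ∀ (L : List (String × ChannelData)) (Q : List (Int × Int)),
    List.Forall₂
      (fun (kv : String × ChannelData) (q : Int × Int) =>
        kv.2.gates = [q.1, q.2] ∧ kv.1 = PySem.Int.toStr q.1 ++ "-" ++ PySem.Int.toStr q.2)
      L Q →
    (∀ q ∈ Q, q ∈ PAIRS) → ∀ acc,
    L.foldl (fun defined_channels kv =>
      match kv.2.gates with
      | [gate1, gate2] =>
          if PySem.Set.contains (PySem.Set.ofList ag) gate1 &&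
             PySem.Set.contains (PySem.Set.ofList ag) gate2 then
            defined_channels ++ [kv.1]
          else defined_channels
      | _ => defined_channels) acc
    = acc ++ ((Q.filter (fun q =>
        PySem.Set.contains ((PySem.List.dedup ag).foldl tallyStep
          ((PySem.Set.empty : PySem.Set Int), (PySem.Set.empty : PySem.Set (Int × Int)))).2 q)).map
        (fun q => PySem.Int.toStr q.1 ++ "-" ++ PySem.Int.toStr q.2)) := by
  intro L Q hrel
  induction hrel with
  | nil => simp
  | @cons kv q L Q hkvq hrest ih =>
    intro hQ acc
    obtain ⟨hg, hkey⟩ := hkvq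
    have hq : q ∈ PAIRS := hQ q (List.mem_cons_self ..)
    have hiff := defined_iff q hq ag
    simp only [List.foldl_cons, List.filter_cons, hg]
    by_cases hdef : q ∈ ((PySem.List.dedup ag).foldl tallyStep
        ((PySem.Set.empty : PySem.Set Int), (PySem.Set.empty : PySem.Set (Int × Int)))).2
    · have hc : (PySem.Set.contains (PySem.Set.ofList ag) q.1 &&
          PySem.Set.contains (PySem.Set.ofList ag) q.2) = true := by
        have := hiff.mp hdef
        simp only [Bool.and_eq_true, PySem.Set.contains_iff, PySem.Set.mem_ofList]
        exact this
      rw [if_pos hc, if_pos (by simpa [PySem.Set.contains_iff] using hdef)]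
      rw [ih (fun x hx => hQ x (List.mem_cons_of_mem _ hx))]
      simp [hkey]
    · have hc : ¬ ((PySem.Set.contains (PySem.Set.ofList ag) q.1 &&
          PySem.Set.contains (PySem.Set.ofList ag) q.2) = true) := by
        simp only [Bool.and_eq_true, PySem.Set.contains_iff, PySem.Set.mem_ofList]
        intro h
        exact hdef (hiff.mpr h)
      rw [if_neg hc, if_neg (by simpa [PySem.Set.contains_iff] using hdef)]
      exact ih (fun x hx => hQ x (List.mem_cons_of_mem _ hx)) acc

-- ===== VERDICT (by name: the statement is the Claim_ definition above) =====
theorem get_defined_channels_spec : Claim_equal_get_defined_channels := by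
  intro ag _
  unfold Spec_get_defined_channels get_defined_channels get_defined_channels_alt
  rw [show (fun (st : PySem.Set Int × PySem.Set (Int × Int)) (g : Int) =>
      let defined := (PySem.Dict.getD INDEX g []).foldl
        (fun df (p : Int × Int × Int) => if PySem.Set.contains st.1 p.1 then PySem.Set.add df p.2 else df) st.2
      ((PySem.Set.add st.1 g, defined) : PySem.Set Int × PySem.Set (Int × Int))) = tallyStep from rfl]
  rw [final_eq ag CHANNELS PAIRS channels_pairs (fun q h => h) []]
  simp
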